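-- pv_equiv track=rewrite | github.com/mborrus/featurefinder | scrapers/new_yorker.py | _determine_special_note
-- ===== SOURCE A (Python) =====
-- def _determine_special_note(text: str) -> str:
--     """Determine what makes this screening special"""
--     notes = []
--     text_lower = text.lower()
--
--     # Check for New Yorker-specific markers
--     if "critic's pick" in text_lower or "critics' pick" in text_lower:
--         notes.append("Critic's Pick")
--     if any(word in text_lower for word in ['q&a', 'q & a']):
--         notes.append('Q&A')
--     if 'director' in text_lower and any(word in text_lower for word in ['appearance', 'present', 'person', 'attendance', 'in person']):
--         notes.append('Director Appearance')
--     if '35mm' in text_lower: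
--         notes.append('35mm')
--     if '70mm' in text_lower:
--         notes.append('70mm')
--     if 'imax' in text_lower:
--         notes.append('IMAX')
--     if 'restoration' in text_lower or 'restored' in text_lower or '4k' in text_lower:
--         notes.append('Restoration')
--     if 'premiere' in text_lower or 'opening night' in text_lower:
--         notes.append('Premiere')
--     if any(word in text_lower for word in ['retrospective', 'series', 'festival']):
--         notes.append('Special Series')
--     if 'exclusive' in text_lower:
--         notes.append('Exclusive')
--     if any(word in text_lower for word in ['repertory', 'revival', 'classic screening']):
--         notes.append('Repertory')
--
--     return ' | '.join(notes) if notes else ''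
-- ===== SOURCE B (Python) =====
-- _PATTERNS = ["critic's pick", "critics' pick", "q&a", "q & a", "director",
--              "appearance", "present", "person", "attendance", "in person",
--              "35mm", "70mm", "imax", "restoration", "restored", "4k",
--              "premiere", "opening night", "retrospective", "series",
--              "festival", "exclusive", "repertory", "revival",
--              "classic screening"]
--
-- _LABELS = [
--     ("Critic's Pick", [["critic's pick", "critics' pick"]]),
--     ("Q&A", [["q&a", "q & a"]]),
--     ("Director Appearance", [["director"], ["appearance", "present", "person", "attendance", "in person"]]),
--     ("35mm", [["35mm"]]),
--     ("70mm", [["70mm"]]),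
--     ("IMAX", [["imax"]]),
--     ("Restoration", [["restoration", "restored", "4k"]]),
--     ("Premiere", [["premiere", "opening night"]]),
--     ("Special Series", [["retrospective", "series", "festival"]]),
--     ("Exclusive", [["exclusive"]]),
--     ("Repertory", [["repertory", "revival", "classic screening"]]),
-- ]
--
--
-- def _determine_special_note(text: str) -> str:
--     """Determine what makes this screening special"""
--     t = text.lower()
--     # Stage 1: one left-to-right scan over the text, collecting every marker
--     # pattern that occurs anywhere (naive multi-pattern matcher).
--     hits = set()
--     for i in range(len(t)):
--         for p in _PATTERNS:
--             if p not in hits and t.startswith(p, i):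
--                 hits.add(p)
--     # Stage 2: derive labels from the hit set alone (no further text scans).
--     notes = [label for label, groups in _LABELS
--              if all(any(p in hits for p in g) for g in groups)]
--     return ' | '.join(notes) if notes else ''
-- ===== Notes on version B (the rewrite author's own statement) =====
-- stated objective: alternative
-- what changed: Instead of A's cascade of independent substring searches, B makes one left-to-right scan over the lowercased text collecting every marker pattern that starts at each position into a hit set (naive multi-pattern matching), then derives the labels from the hit set alone via a (label, groups) table with no further text scans.
import Mathlib
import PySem

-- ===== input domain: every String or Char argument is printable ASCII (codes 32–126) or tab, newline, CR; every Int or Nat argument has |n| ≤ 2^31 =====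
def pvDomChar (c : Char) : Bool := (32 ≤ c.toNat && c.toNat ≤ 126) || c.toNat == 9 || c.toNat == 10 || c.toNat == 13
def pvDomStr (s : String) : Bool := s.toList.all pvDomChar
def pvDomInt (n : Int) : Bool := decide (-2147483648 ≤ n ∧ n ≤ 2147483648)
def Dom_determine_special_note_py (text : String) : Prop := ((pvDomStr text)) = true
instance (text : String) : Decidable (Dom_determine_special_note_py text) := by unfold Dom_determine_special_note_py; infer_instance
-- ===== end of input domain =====

-- B replaces A's cascade of independent substring searches by one left-to-right scan
-- over the text collecting matched marker patterns into a hit set, then derives the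
-- labels from the hit set alone (objective: alternative; same asymptotic cost).

-- shared transliteration of the final line «' | '.join(notes) if notes else ''» (used by both ports)
def pvFinish (notes : List String) : String :=
  if notes ≠ [] then PySem.Str.join " | " notes else ""

-- ===== PORT A =====  (literal transliteration of the if-cascade)
def determine_special_note_py (text : String) : String :=
  let notes : List String := []
  let text_lower := PySem.Str.lower text
  let notes := if PySem.Str.isIn "critic's pick" text_lower || PySem.Str.isIn "critics' pick" text_lower
               then notes ++ ["Critic's Pick"] else notes
  let notes := if ["q&a", "q & a"].any (fun word => PySem.Str.isIn word text_lower)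
               then notes ++ ["Q&A"] else notes
  let notes := if PySem.Str.isIn "director" text_lower &&
                  ["appearance", "present", "person", "attendance", "in person"].any
                    (fun word => PySem.Str.isIn word text_lower)
               then notes ++ ["Director Appearance"] else notes
  let notes := if PySem.Str.isIn "35mm" text_lower then notes ++ ["35mm"] else notes
  let notes := if PySem.Str.isIn "70mm" text_lower then notes ++ ["70mm"] else notes
  let notes := if PySem.Str.isIn "imax" text_lower then notes ++ ["IMAX"] else notes
  let notes := if PySem.Str.isIn "restoration" text_lower || PySem.Str.isIn "restored" text_lower ||
                  PySem.Str.isIn "4k" text_lower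
               then notes ++ ["Restoration"] else notes
  let notes := if PySem.Str.isIn "premiere" text_lower || PySem.Str.isIn "opening night" text_lower
               then notes ++ ["Premiere"] else notes
  let notes := if ["retrospective", "series", "festival"].any (fun word => PySem.Str.isIn word text_lower)
               then notes ++ ["Special Series"] else notes
  let notes := if PySem.Str.isIn "exclusive" text_lower then notes ++ ["Exclusive"] else notes
  let notes := if ["repertory", "revival", "classic screening"].any (fun word => PySem.Str.isIn word text_lower)
               then notes ++ ["Repertory"] else notes
  pvFinish notes

-- ===== PORT B =====  (position scan collecting a hit set, then table-driven labels)
def pvPatterns : List (List Char) :=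
  ["critic's pick".toList, "critics' pick".toList, "q&a".toList, "q & a".toList,
   "director".toList, "appearance".toList, "present".toList, "person".toList,
   "attendance".toList, "in person".toList, "35mm".toList, "70mm".toList,
   "imax".toList, "restoration".toList, "restored".toList, "4k".toList,
   "premiere".toList, "opening night".toList, "retrospective".toList,
   "series".toList, "festival".toList, "exclusive".toList, "repertory".toList,
   "revival".toList, "classic screening".toList]

def pvLabels : List (String × List (List (List Char))) :=
  [("Critic's Pick", [["critic's pick".toList, "critics' pick".toList]]),
   ("Q&A", [["q&a".toList, "q & a".toList]]),
   ("Director Appearance", [["director".toList],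
      ["appearance".toList, "present".toList, "person".toList, "attendance".toList, "in person".toList]]),
   ("35mm", [["35mm".toList]]),
   ("70mm", [["70mm".toList]]),
   ("IMAX", [["imax".toList]]),
   ("Restoration", [["restoration".toList, "restored".toList, "4k".toList]]),
   ("Premiere", [["premiere".toList, "opening night".toList]]),
   ("Special Series", [["retrospective".toList, "series".toList, "festival".toList]]),
   ("Exclusive", [["exclusive".toList]]),
   ("Repertory", [["repertory".toList, "revival".toList, "classic screening".toList]])]

-- Python's «t.startswith(p, i)» for 0 ≤ i is exactly «startswith (t[i:]) p»: ported as
-- PySem.Chars.startswith (cs.drop i) p (exact for the Nat indices of range(len(t))).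
def pvScan (cs : List Char) : PySem.Set (List Char) :=
  (List.range cs.length).foldl
    (fun hits i => pvPatterns.foldl
      (fun hits p =>
        if !(PySem.Set.contains hits p) && PySem.Chars.startswith (cs.drop i) p
        then PySem.Set.add hits p else hits)
      hits)
    PySem.Set.empty

def determine_special_note_py_alt (text : String) : String :=
  let t := (PySem.Str.lower text).toList
  let hits := pvScan t
  let notes := (pvLabels.filter
      (fun e => e.2.all (fun g => g.any (fun p => PySem.Set.contains hits p)))).map
      (fun e => e.1)
  pvFinish notes

-- ===== PRECONDITION & SPEC =====
def Spec_determine_special_note_py (text : String) (out : String) : Prop := out = determine_special_note_py_alt text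
instance (text : String) (out : String) : Decidable (Spec_determine_special_note_py text out) := by unfold Spec_determine_special_note_py; infer_instance

-- ===== CLAIM (what is proved, stated in full; the proofs are below) =====
def Claim_equal_determine_special_note_py : Prop := ∀ (text : String), Dom_determine_special_note_py text → Spec_determine_special_note_py text (determine_special_note_py text)

-- ===== LEMMAS AND PROOFS =====

-- the inner for-loop over the pattern list: membership after the pass
lemma pvMemInner (ps : List (List Char)) (hits : PySem.Set (List Char)) (s p : List Char) :
    p ∈ ps.foldl
      (fun hits q =>
        if !(PySem.Set.contains hits q) && PySem.Chars.startswith s q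
        then PySem.Set.add hits q else hits) hits
      ↔ p ∈ hits ∨ (p ∈ ps ∧ PySem.Chars.startswith s p = true) := by
  induction ps generalizing hits with
  | nil => simp
  | cons q qs ih =>
    simp only [List.foldl_cons, ih, List.mem_cons]
    by_cases hq : PySem.Set.contains hits q
    · simp only [hq]
      constructor
      · rintro (h | h) <;> tauto
      · rintro (h | ⟨(h | h), hs⟩)
        · tauto
        · subst h; left; exact (PySem.Set.contains_iff hits p).mp hq
        · tauto
    · by_cases hs : PySem.Chars.startswith s q
      · simp only [hq, hs, Bool.not_false, Bool.true_and, if_true, PySem.Set.mem_add]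
        constructor
        · rintro (⟨h | h⟩ | h)
          · tauto
          · subst h; right; exact ⟨Or.inl rfl, hs⟩
          · tauto
        · rintro (h | ⟨(h | h), hsp⟩) <;> tauto
      · have hs' : PySem.Chars.startswith s q = false := Bool.eq_false_iff.mpr hs
        rw [if_neg (by simp [hs'])]
        constructor
        · rintro (h | h) <;> tauto
        · rintro (h | ⟨(h | h), hsp⟩)
          · tauto
          · subst h; exact absurd hsp (by simp [hs'])
          · tauto

-- the outer for-loop over range(len(t)): membership in the final hit set
lemma pvMemScan (cs : List Char) (p : List Char) (n : Nat) :
    p ∈ (List.range n).foldl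
      (fun hits i => pvPatterns.foldl
        (fun hits q =>
          if !(PySem.Set.contains hits q) && PySem.Chars.startswith (cs.drop i) q
          then PySem.Set.add hits q else hits) hits)
      PySem.Set.empty
      ↔ ∃ i < n, p ∈ pvPatterns ∧ PySem.Chars.startswith (cs.drop i) p = true := by
  induction n with
  | zero => simp [PySem.Set.empty]
  | succ n ih =>
    rw [List.range_succ, List.foldl_append]
    simp only [List.foldl_cons, List.foldl_nil, pvMemInner, ih]
    constructor
    · rintro (⟨i, hi, h⟩ | h)
      · exact ⟨i, by omega, h⟩
      · exact ⟨n, by omega, h⟩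
    · rintro ⟨i, hi, h⟩
      by_cases hin : i < n
      · exact Or.inl ⟨i, hin, h⟩
      · have : i = n := by omega
        subst this; exact Or.inr h
    
-- for each (nonempty) marker pattern, the scan's hit set answers exactly «p in t»
lemma pvContainsScan (cs p : List Char) (hp : p ∈ pvPatterns) (hne : p ≠ []) :
    PySem.Set.contains (pvScan cs) p = PySem.Chars.isIn p cs := by
  have h1 : PySem.Set.contains (pvScan cs) p = true
      ↔ ∃ i < cs.length, PySem.Chars.startswith (cs.drop i) p = true := by
    rw [PySem.Set.contains_iff]
    unfold pvScan
    rw [pvMemScan]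
    constructor
    · rintro ⟨i, hi, _, h⟩; exact ⟨i, hi, h⟩
    · rintro ⟨i, hi, h⟩; exact ⟨i, hi, hp, h⟩
  have h2 : (∃ i < cs.length, PySem.Chars.startswith (cs.drop i) p = true)
      ↔ PySem.Chars.isIn p cs = true := by
    rw [← PySem.Chars.exists_prefix_drop_iff_isIn]
    constructor
    · rintro ⟨i, _, h⟩; exact ⟨i, (PySem.Chars.startswith_iff _ _).mp h⟩
    · rintro ⟨j, h⟩
      refine ⟨j, ?_, (PySem.Chars.startswith_iff _ _).mpr h⟩
      by_contra hj
      have : cs.drop j = [] := List.drop_eq_nil_of_le (by omega)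
      rw [this] at h
      exact hne (List.prefix_nil.mp h)
  cases hb : PySem.Chars.isIn p cs
  · cases hc : PySem.Set.contains (pvScan cs) p
    · rfl
    · exact absurd (h2.mp (h1.mp hc)) (by simp [hb])
  · exact h1.mpr (h2.mpr hb)

lemma pvSegAppend (c : Bool) (l : String) (xs : List String) :
    (if c = true then xs ++ [l] else xs) = xs ++ (if c = true then [l] else []) := by
  cases c <;> simp

lemma pvMapFilterCons {α β : Type} (p : α → Bool) (f : α → β) (x : α) (t : List α) :
    ((x :: t).filter p).map f
      = (if p x = true then [f x] else []) ++ (t.filter p).map f := by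
  by_cases h : p x <;> simp [h]

-- ===== VERDICT (by name: the statement is the Claim_ definition above) =====
set_option maxHeartbeats 1000000 in
theorem determine_special_note_py_spec : Claim_equal_determine_special_note_py := by
  intro text _
  unfold Spec_determine_special_note_py determine_special_note_py determine_special_note_py_alt pvLabels
  apply congrArg pvFinish
  have hc := fun p hp hne => pvContainsScan (PySem.Str.lower text).toList p hp hne
  have h0 := hc "critic's pick".toList (by decide) (by decide)
  have h1 := hc "critics' pick".toList (by decide) (by decide)
  have h2 := hc "q&a".toList (by decide) (by decide)
  have h3 := hc "q & a".toList (by decide) (by decide)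
  have h4 := hc "director".toList (by decide) (by decide)
  have h5 := hc "appearance".toList (by decide) (by decide)
  have h6 := hc "present".toList (by decide) (by decide)
  have h7 := hc "person".toList (by decide) (by decide)
  have h8 := hc "attendance".toList (by decide) (by decide)
  have h9 := hc "in person".toList (by decide) (by decide)
  have h10 := hc "35mm".toList (by decide) (by decide)
  have h11 := hc "70mm".toList (by decide) (by decide)
  have h12 := hc "imax".toList (by decide) (by decide)
  have h13 := hc "restoration".toList (by decide) (by decide)
  have h14 := hc "restored".toList (by decide) (by decide)
  have h15 := hc "4k".toList (by decide) (by decide)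
  have h16 := hc "premiere".toList (by decide) (by decide)
  have h17 := hc "opening night".toList (by decide) (by decide)
  have h18 := hc "retrospective".toList (by decide) (by decide)
  have h19 := hc "series".toList (by decide) (by decide)
  have h20 := hc "festival".toList (by decide) (by decide)
  have h21 := hc "exclusive".toList (by decide) (by decide)
  have h22 := hc "repertory".toList (by decide) (by decide)
  have h23 := hc "revival".toList (by decide) (by decide)
  have h24 := hc "classic screening".toList (by decide) (by decide)
  simp only [pvSegAppend, pvMapFilterCons, List.filter_nil, List.map_nil,
    List.any_cons, List.any_nil, List.all_cons, List.all_nil,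
    h0, h1, h2, h3, h4, h5, h6, h7, h8, h9, h10, h11, h12, h13, h14, h15, h16, h17, h18, h19, h20, h21, h22, h23, h24,
    PySem.Str.isIn_eq,
    Bool.or_false, Bool.and_true, Bool.or_assoc,
    List.nil_append, List.append_nil]
  simp only [List.append_assoc]
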